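-- pv_equiv track=rewrite | github.com/kojeomstudio/AI | study/algorithm/jumping_frog.py | solution
-- ===== SOURCE A (Python) =====
-- from collections import deque
--
-- def solution(A):
--     N = len(A)
--
--     fib = [0, 1]
--     while fib[-1] + fib[-2] <= N + 1:
--         fib.append(fib[-1] + fib[-2])
--     fib = fib[2:]
--
--     queue = deque()
--     visited = [False] * (N + 1)
--
--     for jump in fib:
--         next_pos = jump - 1
--
--         if next_pos == N:
--             return 1
--         if 0 <= next_pos < N and A[next_pos] == 1:
--             queue.append((next_pos, 1))
--             visited[next_pos] = True
--
--     while len(queue) > 0: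
--         curr, jumps = queue.popleft()
--         for jump in fib:
--             next_pos = curr + jump
--             if next_pos == N:
--                 return jumps + 1
--             if 0 <= next_pos < N and A[next_pos] == 1 and not visited[next_pos]:
--                 visited[next_pos] = True
--                 queue.append((next_pos, jumps + 1))
--
--     return -1
-- ===== SOURCE B (Python) =====
-- def solution(A):
--     N = len(A)
--
--     fib = [0, 1]
--     while fib[-1] + fib[-2] <= N + 1:
--         fib.append(fib[-1] + fib[-2])
--     fib = fib[2:]
--
--     INF = N + 2  # larger than any possible jump count
--
--     def best_to(p, dp):
--         # fewest jumps to land on position p coming from -1 or an earlier leaf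
--         best = INF
--         for j in fib:
--             q = p - j
--             if q == -1:
--                 cand = 1
--             elif q >= 0:
--                 cand = dp[q] + 1
--             else:
--                 continue
--             if cand < best:
--                 best = cand
--         return best
--
--     dp = []  # dp[p] = fewest jumps to stand on p (INF if impossible)
--     for p in range(N):
--         dp.append(best_to(p, dp) if A[p] == 1 else INF)
--
--     ans = best_to(N, dp)
--     return ans if ans <= N + 1 else -1
-- ===== Notes on version B (the rewrite author's own statement) =====
-- stated objective: alternative
-- what changed: Replaces the BFS (deque + visited array over fib-jump edges) by a left-to-right dynamic program: dp[p] = fewest jumps to stand on leaf p, computed as 1 + min over fib predecessors (virtual start -1 counts as 0), with the answer read off at position N; same fib list construction.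
import Mathlib
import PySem

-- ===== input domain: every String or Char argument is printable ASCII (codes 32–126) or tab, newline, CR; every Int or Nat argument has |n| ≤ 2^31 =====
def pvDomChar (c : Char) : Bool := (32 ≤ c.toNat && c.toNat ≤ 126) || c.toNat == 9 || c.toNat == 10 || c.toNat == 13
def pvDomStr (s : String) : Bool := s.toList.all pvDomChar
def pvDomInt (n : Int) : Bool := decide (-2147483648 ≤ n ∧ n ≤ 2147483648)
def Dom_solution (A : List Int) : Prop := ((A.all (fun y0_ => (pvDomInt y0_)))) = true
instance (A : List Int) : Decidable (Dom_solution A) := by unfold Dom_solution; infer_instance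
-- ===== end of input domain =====

-- B re-implements the BFS as a left-to-right dynamic program over positions (same fib jump list);
-- objective: alternative algorithm of similar cost. Return values proved equal on all inputs.

-- ===== PORT A =====
-- shared helper: the Python `fib` list construction (fib[-1], fib[-2] carried as b, a+b pair);
-- fuel only makes the while-loop total, it is never reached (the pair sum strictly increases).
def fibAux (limit a b : Int) (acc : List Int) : Nat → List Int
  | 0 => acc
  | f + 1 => if a + b ≤ limit then fibAux limit b (a + b) (acc ++ [a + b]) f else acc

def pvFib (N : Nat) : List Int := (fibAux ((N : Int) + 1) 0 1 [0, 1] (N + 3)).drop 2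

-- the seeding `for jump in fib` loop (before the BFS while-loop); .inl = early `return 1`
def seedLoop (A : List Int) (fibs : List Int) (queue : List (Int × Int)) (visited : List Bool) :
    Sum Int (List (Int × Int) × List Bool) :=
  match fibs with
  | [] => .inr (queue, visited)
  | j :: rest =>
    let np := j - 1
    if np = (A.length : Int) then .inl 1
    else if 0 ≤ np ∧ np < (A.length : Int) ∧ A.getD np.toNat 0 = 1 then
      seedLoop A rest (queue ++ [(np, 1)]) (visited.set np.toNat true)
    else seedLoop A rest queue visited

-- the inner `for jump in fib` loop of the BFS; .inl = early `return jumps + 1`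
def procLoop (A : List Int) (fibs : List Int) (curr jumps : Int) (queue : List (Int × Int))
    (visited : List Bool) : Sum Int (List (Int × Int) × List Bool) :=
  match fibs with
  | [] => .inr (queue, visited)
  | j :: rest =>
    let np := curr + j
    if np = (A.length : Int) then .inl (jumps + 1)
    else if 0 ≤ np ∧ np < (A.length : Int) ∧ A.getD np.toNat 0 = 1 ∧ visited.getD np.toNat false = false then
      procLoop A rest curr jumps (queue ++ [(np, jumps + 1)]) (visited.set np.toNat true)
    else procLoop A rest curr jumps queue visited

-- the BFS `while len(queue) > 0` loop; the fuel given at the call site is provably sufficient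
def bfsLoop (A : List Int) (fibs : List Int) : Nat → List (Int × Int) → List Bool → Int
  | 0, _, _ => -1
  | _ + 1, [], _ => -1
  | f + 1, (curr, jumps) :: rest, visited =>
    match procLoop A fibs curr jumps rest visited with
    | .inl r => r
    | .inr (q', v') => bfsLoop A fibs f q' v'

def solution (A : List Int) : Int :=
  let N := A.length
  let fibs := pvFib N
  match seedLoop A fibs [] (List.replicate (N + 1) false) with
  | .inl r => r
  | .inr (q, v) => bfsLoop A fibs (2 * (N + 1) + q.length) q v

-- ===== PORT B =====
-- `best_to(p, dp)`: fold of the inner `for j in fib` loop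
def dpStep (dp : List Int) (INF : Int) (fibs : List Int) (p : Int) : Int :=
  fibs.foldl (fun best j =>
    let q := p - j
    if q = -1 then (if 1 < best then 1 else best)
    else if 0 ≤ q then (let c := dp.getD q.toNat 0 + 1; if c < best then c else best)
    else best) INF

-- the `for p in range(N)` loop building dp
def pvDP (A : List Int) : List Int :=
  (List.range A.length).foldl
    (fun dp p =>
      dp ++ [if A.getD p 0 = 1 then dpStep dp ((A.length : Int) + 2) (pvFib A.length) (p : Int)
             else (A.length : Int) + 2]) []

def solution_alt (A : List Int) : Int :=
  let N := A.length
  let INF : Int := (N : Int) + 2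
  let dp := pvDP A
  let ans := dpStep dp INF (pvFib N) (N : Int)
  if ans ≤ (N : Int) + 1 then ans else -1

-- ===== PRECONDITION & SPEC =====
def Spec_solution (A : List Int) (out : Int) : Prop := out = solution_alt A
instance (A : List Int) (out : Int) : Decidable (Spec_solution A out) := by unfold Spec_solution; infer_instance

-- ===== CLAIM (what is proved, stated in full; the proofs are below) =====
def Claim_equal_solution : Prop := ∀ (A : List Int), Dom_solution A → Spec_solution A (solution A)

-- ===== LEMMAS AND PROOFS =====

-- the distance oracle: pvD A x = fewest jumps to stand on x (N+2 if impossible), read off B's dp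
def pvD (A : List Int) (x : Int) : Int :=
  if x = (A.length : Int) then dpStep (pvDP A) ((A.length : Int) + 2) (pvFib A.length) x
  else if 0 ≤ x ∧ x < (A.length : Int) then (pvDP A).getD x.toNat 0
  else (A.length : Int) + 2

-- ---------- fib list facts ----------
def fibTail (limit a b : Int) : Nat → List Int
  | 0 => []
  | f + 1 => if a + b ≤ limit then (a + b) :: fibTail limit b (a + b) f else []

theorem fibAux_eq_append (limit : Int) : ∀ (f : Nat) (a b : Int) (acc : List Int),
    fibAux limit a b acc f = acc ++ fibTail limit a b f := by
  intro f
  induction f with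
  | zero => intro a b acc; simp [fibAux, fibTail]
  | succ f ih =>
    intro a b acc
    simp only [fibAux, fibTail]
    split
    · rw [ih]; simp
    · simp

theorem fibTail_mem (limit : Int) : ∀ (f : Nat) (a b : Int), 0 ≤ a → 1 ≤ b →
    ∀ x ∈ fibTail limit a b f, a + b ≤ x ∧ x ≤ limit := by
  intro f
  induction f with
  | zero => intro a b _ _ x hx; simp [fibTail] at hx
  | succ f ih =>
    intro a b ha hb x hx
    simp only [fibTail] at hx
    split at hx
    · rcases List.mem_cons.mp hx with rfl | hx
      · omega
      · have := ih b (a + b) (by omega) (by omega) x hx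
        omega
    · simp at hx

theorem fibTail_pairwise (limit : Int) : ∀ (f : Nat) (a b : Int), 0 ≤ a → 1 ≤ b →
    (fibTail limit a b f).Pairwise (· < ·) := by
  intro f
  induction f with
  | zero => intro a b _ _; simp [fibTail]
  | succ f ih =>
    intro a b ha hb
    simp only [fibTail]
    split
    · refine List.pairwise_cons.mpr ⟨?_, ih b (a + b) (by omega) (by omega)⟩
      intro x hx
      have := fibTail_mem limit f b (a + b) (by omega) (by omega) x hx
      omega
    · simp

theorem pvFib_eq (N : Nat) : pvFib N = fibTail ((N : Int) + 1) 0 1 (N + 3) := by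
  rw [pvFib, fibAux_eq_append]; rfl

theorem pvFib_mem (N : Nat) : ∀ j ∈ pvFib N, 1 ≤ j ∧ j ≤ (N : Int) + 1 := by
  intro j hj
  rw [pvFib_eq] at hj
  have := fibTail_mem ((N : Int) + 1) (N + 3) 0 1 (by omega) (by omega) j hj
  omega

theorem pvFib_nodup (N : Nat) : (pvFib N).Nodup := by
  rw [pvFib_eq]
  exact (fibTail_pairwise _ _ 0 1 (by omega) (by omega)).imp (fun h => ne_of_lt h)

-- ---------- dp fold facts ----------
def dpFold (dp : List Int) (p : Int) (fibs : List Int) (init : Int) : Int :=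
  fibs.foldl (fun best j =>
    let q := p - j
    if q = -1 then (if 1 < best then 1 else best)
    else if 0 ≤ q then (let c := dp.getD q.toNat 0 + 1; if c < best then c else best)
    else best) init

theorem dpStep_eq_dpFold (dp : List Int) (INF : Int) (fibs : List Int) (p : Int) :
    dpStep dp INF fibs p = dpFold dp p fibs INF := rfl

theorem dpFold_nil (dp : List Int) (p init : Int) : dpFold dp p [] init = init := rfl

theorem dpFold_cons (dp : List Int) (p j init : Int) (rest : List Int) :
    dpFold dp p (j :: rest) init = dpFold dp p rest
      (if p - j = -1 then (if 1 < init then 1 else init)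
       else if 0 ≤ p - j then
         (if dp.getD (p - j).toNat 0 + 1 < init then dp.getD (p - j).toNat 0 + 1 else init)
       else init) := rfl

theorem dpFold_le_init (dp : List Int) (p : Int) : ∀ (fibs : List Int) (init : Int),
    dpFold dp p fibs init ≤ init := by
  intro fibs
  induction fibs with
  | nil => intro init; simp [dpFold_nil]
  | cons j rest ih =>
    intro init
    rw [dpFold_cons]
    refine le_trans (ih _) ?_
    split
    · split <;> omega
    · split
      · split <;> omega
      · omega

theorem dpFold_le_one (dp : List Int) (p : Int) : ∀ (fibs : List Int) (init : Int),
    p + 1 ∈ fibs → dpFold dp p fibs init ≤ 1 := by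
  intro fibs
  induction fibs with
  | nil => intro init h; simp at h
  | cons j rest ih =>
    intro init h
    rcases List.mem_cons.mp h with rfl | h
    · rw [dpFold_cons]
      refine le_trans (dpFold_le_init dp p rest _) ?_
      have h1 : p - (p + 1) = -1 := by omega
      simp only [h1, if_pos]
      split <;> omega
    · exact ih _ h

theorem dpFold_le_pred (dp : List Int) (p : Int) : ∀ (fibs : List Int) (init : Int) (j : Int),
    j ∈ fibs → 0 ≤ p - j → dpFold dp p fibs init ≤ dp.getD (p - j).toNat 0 + 1 := by
  intro fibs
  induction fibs with
  | nil => intro init j h; simp at h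
  | cons j0 rest ih =>
    intro init j h hq
    rcases List.mem_cons.mp h with rfl | h
    · rw [dpFold_cons]
      refine le_trans (dpFold_le_init dp p rest _) ?_
      have hne : ¬ (p - j = -1) := by omega
      rw [if_neg hne, if_pos hq]
      split <;> omega
    · exact ih _ j h hq

theorem dpFold_cases (dp : List Int) (p : Int) : ∀ (fibs : List Int) (init : Int),
    dpFold dp p fibs init = init ∨ (p + 1 ∈ fibs ∧ dpFold dp p fibs init = 1) ∨
    (∃ j ∈ fibs, 0 ≤ p - j ∧ dpFold dp p fibs init = dp.getD (p - j).toNat 0 + 1) := by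
  intro fibs
  induction fibs with
  | nil => intro init; left; simp [dpFold_nil]
  | cons j rest ih =>
    intro init
    rw [dpFold_cons]
    rcases ih (if p - j = -1 then (if 1 < init then 1 else init)
       else if 0 ≤ p - j then
         (if dp.getD (p - j).toNat 0 + 1 < init then dp.getD (p - j).toNat 0 + 1 else init)
       else init) with h | h | h
    · rw [h]
      by_cases h1 : p - j = -1
      · rw [if_pos h1]
        by_cases h2 : 1 < init
        · right; left
          exact ⟨List.mem_cons.mpr (Or.inl (by omega)), by rw [if_pos h2]⟩
        · left; rw [if_neg h2]
      · rw [if_neg h1]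
        by_cases h2 : 0 ≤ p - j
        · rw [if_pos h2]
          by_cases h3 : dp.getD (p - j).toNat 0 + 1 < init
          · right; right
            exact ⟨j, List.mem_cons_self .., h2, by rw [if_pos h3]⟩
          · left; rw [if_neg h3]
        · left; rw [if_neg h2]
    · right; left; exact ⟨List.mem_cons_of_mem _ h.1, h.2⟩
    · rcases h with ⟨j', hj', hq, he⟩
      right; right; exact ⟨j', List.mem_cons_of_mem _ hj', hq, he⟩

-- ---------- pvDP characterization ----------
theorem dpFold_congr (dp1 dp2 : List Int) (p : Nat)
    (hag : ∀ i : Nat, i < p → dp1.getD i 0 = dp2.getD i 0) :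
    ∀ (fibs : List Int), (∀ j ∈ fibs, 1 ≤ j) → ∀ (init : Int),
    dpFold dp1 (p : Int) fibs init = dpFold dp2 (p : Int) fibs init := by
  intro fibs
  induction fibs with
  | nil => intro _ init; simp [dpFold_nil]
  | cons j rest ih =>
    intro hf init
    have hj : 1 ≤ j := hf j (List.mem_cons_self ..)
    rw [dpFold_cons, dpFold_cons]
    have hrest : ∀ j ∈ rest, 1 ≤ j := fun j hj => hf j (List.mem_cons_of_mem _ hj)
    by_cases h1 : (p : Int) - j = -1
    · simp only [if_pos h1]
      exact ih hrest _
    · by_cases h2 : 0 ≤ (p : Int) - j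
      · have hlt : ((p : Int) - j).toNat < p := by omega
        simp only [if_neg h1, if_pos h2, hag _ hlt]
        exact ih hrest _
      · simp only [if_neg h1, if_neg h2]
        exact ih hrest _

def dpPartial (A : List Int) (n : Nat) : List Int :=
  (List.range n).foldl
    (fun dp p =>
      dp ++ [if A.getD p 0 = 1 then dpStep dp ((A.length : Int) + 2) (pvFib A.length) (p : Int)
             else (A.length : Int) + 2]) []

theorem pvDP_eq_partial (A : List Int) : pvDP A = dpPartial A A.length := rfl

theorem dpPartial_succ (A : List Int) (n : Nat) :
    dpPartial A (n + 1) = dpPartial A n ++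
      [if A.getD n 0 = 1 then dpStep (dpPartial A n) ((A.length : Int) + 2) (pvFib A.length) (n : Int)
       else (A.length : Int) + 2] := by
  unfold dpPartial
  rw [List.range_succ, List.foldl_append]
  rfl

theorem dpPartial_length (A : List Int) : ∀ n, (dpPartial A n).length = n := by
  intro n
  induction n with
  | zero => rfl
  | succ n ih => rw [dpPartial_succ]; simp [ih]

theorem dpPartial_stable (A : List Int) : ∀ (m n i : Nat), n ≤ m → i < n →
    (dpPartial A m).getD i 0 = (dpPartial A n).getD i 0 := by
  intro m
  induction m with
  | zero => intro n i h1 h2; omega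
  | succ m ih =>
    intro n i h1 h2
    rcases Nat.lt_or_ge n (m + 1) with h | h
    · rw [dpPartial_succ]
      rw [List.getD_append _ _ _ _ (by rw [dpPartial_length]; omega)]
      exact ih n i (by omega) h2
    · have : n = m + 1 := by omega
      rw [this]

theorem pvDP_entry (A : List Int) (p : Nat) (hp : p < A.length) :
    (pvDP A).getD p 0 =
      if A.getD p 0 = 1 then dpFold (pvDP A) (p : Int) (pvFib A.length) ((A.length : Int) + 2)
      else (A.length : Int) + 2 := by
  have h1 : (pvDP A).getD p 0 = (dpPartial A (p + 1)).getD p 0 := by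
    rw [pvDP_eq_partial]; exact dpPartial_stable A A.length (p + 1) p (by omega) (by omega)
  rw [h1, dpPartial_succ]
  have hlen : (dpPartial A p).length = p := dpPartial_length A p
  rw [List.getD_eq_getElem?_getD, List.getElem?_append_right (by omega), hlen]
  simp only [Nat.sub_self, List.getElem?_cons_zero, Option.getD_some]
  by_cases hc : A.getD p 0 = 1
  · rw [if_pos hc, if_pos hc, dpStep_eq_dpFold]
    apply dpFold_congr
    · intro i hi
      rw [pvDP_eq_partial]
      exact (dpPartial_stable A A.length p i (by omega) hi).symm
    · intro j hj; exact (pvFib_mem A.length j hj).1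
  · rw [if_neg hc, if_neg hc]

-- ---------- the distance oracle pvD ----------
def pvGood (A : List Int) (x : Int) : Prop :=
  x = (A.length : Int) ∨ (0 ≤ x ∧ x < (A.length : Int) ∧ A.getD x.toNat 0 = 1)

theorem pvD_entry (A : List Int) (x : Int) (h0 : 0 ≤ x) (h1 : x < (A.length : Int)) :
    pvD A x = (pvDP A).getD x.toNat 0 := by
  unfold pvD
  rw [if_neg (by omega), if_pos ⟨h0, h1⟩]

theorem pvD_N (A : List Int) :
    pvD A (A.length : Int) = dpFold (pvDP A) ((A.length : Int)) (pvFib A.length) ((A.length : Int) + 2) := by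
  unfold pvD
  rw [if_pos rfl, dpStep_eq_dpFold]

theorem pvD_bad (A : List Int) (x : Int) (h0 : 0 ≤ x) (h1 : x < (A.length : Int))
    (hb : ¬ A.getD x.toNat 0 = 1) : pvD A x = (A.length : Int) + 2 := by
  rw [pvD_entry A x h0 h1]
  have hx : x.toNat < A.length := by omega
  rw [pvDP_entry A x.toNat hx, if_neg hb]

theorem pvD_rec_good (A : List Int) (x : Int) (hg : pvGood A x) :
    pvD A x = dpFold (pvDP A) x (pvFib A.length) ((A.length : Int) + 2) := by
  rcases hg with rfl | ⟨h0, h1, hok⟩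
  · exact pvD_N A
  · rw [pvD_entry A x h0 h1]
    have hx : x.toNat < A.length := by omega
    rw [pvDP_entry A x.toNat hx, if_pos hok]
    have : ((x.toNat : Nat) : Int) = x := by omega
    rw [this]

theorem pvDP_ge_one (A : List Int) : ∀ i : Nat, i < A.length → 1 ≤ (pvDP A).getD i 0 := by
  intro i
  induction i using Nat.strong_induction_on with
  | _ i ih =>
    intro hi
    rw [pvDP_entry A i hi]
    split
    · rcases dpFold_cases (pvDP A) (i : Int) (pvFib A.length) ((A.length : Int) + 2)
        with h | h | ⟨j, hj, hq, h⟩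
      · rw [h]; omega
      · rw [h.2]
      · rw [h]
        have hj1 := (pvFib_mem A.length j hj).1
        have hlt : ((i : Int) - j).toNat < i := by omega
        have := ih _ hlt (by omega)
        omega
    · omega

theorem pvD_ge_one (A : List Int) (x : Int) : 1 ≤ pvD A x := by
  unfold pvD
  split
  · rename_i hx
    subst hx
    rw [dpStep_eq_dpFold]
    rcases dpFold_cases (pvDP A) (A.length : Int) (pvFib A.length) ((A.length : Int) + 2)
      with h | h | ⟨j, hj, hq, h⟩
    · rw [h]; omega
    · rw [h.2]
    · rw [h]
      have hj1 := (pvFib_mem A.length j hj).1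
      have := pvDP_ge_one A ((A.length : Int) - j).toNat (by omega)
      omega
  · split
    · rename_i h0
      exact pvDP_ge_one A x.toNat (by omega)
    · omega

theorem pvD_le_one (A : List Int) (x : Int) (hg : pvGood A x)
    (hm : x + 1 ∈ pvFib A.length) : pvD A x ≤ 1 := by
  rw [pvD_rec_good A x hg]
  exact dpFold_le_one _ _ _ _ hm

theorem pvD_le_pred (A : List Int) (x j : Int) (hg : pvGood A x)
    (hj : j ∈ pvFib A.length) (hq : 0 ≤ x - j) : pvD A x ≤ pvD A (x - j) + 1 := by
  have hj1 := (pvFib_mem A.length j hj).1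
  have hxN : x ≤ (A.length : Int) := by
    rcases hg with rfl | ⟨_, h1, _⟩ <;> omega
  have h2 : x - j < (A.length : Int) := by omega
  rw [pvD_rec_good A x hg, pvD_entry A (x - j) hq h2]
  exact dpFold_le_pred _ _ _ _ j hj hq

theorem pvD_fin_le (A : List Int) : ∀ (n : Nat) (x : Int), x.toNat = n → 0 ≤ x →
    x ≤ (A.length : Int) → pvD A x < (A.length : Int) + 2 → pvD A x ≤ x + 1 := by
  intro n
  induction n using Nat.strong_induction_on with
  | _ n ih =>
    intro x hn h0 hN hfin
    by_cases hg : pvGood A x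
    · rw [pvD_rec_good A x hg] at hfin ⊢
      rcases dpFold_cases (pvDP A) x (pvFib A.length) ((A.length : Int) + 2)
        with h | h | ⟨j, hj, hq, h⟩
      · rw [h] at hfin; omega
      · rw [h.2]; omega
      · rw [h] at hfin ⊢
        have hj1 := (pvFib_mem A.length j hj).1
        have h2 : x - j < (A.length : Int) := by omega
        have hpe : pvD A (x - j) = (pvDP A).getD (x - j).toNat 0 := pvD_entry A (x - j) hq h2
        have := ih (x - j).toNat (by omega) (x - j) rfl hq (by omega) (by rw [hpe]; omega)
        rw [hpe] at this
        omega
    · have hxN : x < (A.length : Int) := by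
        rcases lt_or_eq_of_le hN with h | h
        · exact h
        · exact absurd (Or.inl h) hg
      have hb : ¬ A.getD x.toNat 0 = 1 := by
        intro hc; exact hg (Or.inr ⟨h0, hxN, hc⟩)
      rw [pvD_bad A x h0 hxN hb] at hfin
      omega

theorem pvD_P1 (A : List Int) (x : Int) (hg : pvGood A x)
    (hfin : pvD A x < (A.length : Int) + 2) :
    (x + 1 ∈ pvFib A.length ∧ pvD A x = 1) ∨
    ∃ j ∈ pvFib A.length, 0 ≤ x - j ∧ x - j < (A.length : Int) ∧
      A.getD (x - j).toNat 0 = 1 ∧ pvD A (x - j) < (A.length : Int) + 2 ∧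
      pvD A x = pvD A (x - j) + 1 := by
  have hrec := pvD_rec_good A x hg
  rcases dpFold_cases (pvDP A) x (pvFib A.length) ((A.length : Int) + 2)
    with h | h | ⟨j, hj, hq, h⟩
  · rw [hrec, h] at hfin; omega
  · left; exact ⟨h.1, by rw [hrec, h.2]⟩
  · right
    have hj1 := (pvFib_mem A.length j hj).1
    have hxN : x ≤ (A.length : Int) := by
      rcases hg with rfl | ⟨_, h1, _⟩ <;> omega
    have h2 : x - j < (A.length : Int) := by omega
    have hpe : pvD A (x - j) = (pvDP A).getD (x - j).toNat 0 := pvD_entry A (x - j) hq h2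
    have hval : pvD A x = pvD A (x - j) + 1 := by rw [hrec, h, hpe]
    have hqfin : pvD A (x - j) < (A.length : Int) + 2 := by omega
    have hokq : A.getD (x - j).toNat 0 = 1 := by
      by_contra hb
      rw [pvD_bad A (x - j) hq h2 hb] at hqfin
      omega
    exact ⟨j, hj, hq, h2, hokq, hqfin, hval⟩

-- ---------- visited array helpers ----------
theorem getD_set_self (v : List Bool) (i : Nat) (h : i < v.length) :
    (v.set i true).getD i false = true := by
  rw [List.getD_eq_getElem?_getD, List.getElem?_set_self (by omega)]
  rfl

theorem getD_set_other (v : List Bool) (i j : Nat) (hne : i ≠ j) :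
    (v.set i true).getD j false = v.getD j false := by
  rw [List.getD_eq_getElem?_getD, List.getD_eq_getElem?_getD, List.getElem?_set_ne hne]

theorem getD_set_mono (v : List Bool) (i j : Nat) (h : v.getD j false = true) :
    (v.set i true).getD j false = true := by
  by_cases hne : i = j
  · subst hne
    have hi : i < v.length := by
      by_contra hc
      rw [List.getD_eq_getElem?_getD, List.getElem?_eq_none (by omega)] at h
      simp at h
    exact getD_set_self v i hi
  · rw [getD_set_other v i j hne]; exact h

theorem getD_set_rev (v : List Bool) (i j : Nat) (h : (v.set i true).getD j false = true) :
    v.getD j false = true ∨ j = i := by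
  by_cases hne : i = j
  · right; omega
  · left; rw [getD_set_other v i j hne] at h; exact h

theorem count_false_set_true (v : List Bool) : ∀ (i : Nat), i < v.length →
    v.getD i false = false → (v.set i true).count false + 1 = v.count false := by
  induction v with
  | nil => intro i h; simp at h
  | cons b t ih =>
    intro i hi hf
    cases i with
    | zero =>
      have hb : b = false := by simpa [List.getD] using hf
      subst hb
      simp [List.set]
    | succ i =>
      have hi' : i < t.length := by simpa using hi
      have hf' : t.getD i false = false := by simpa [List.getD] using hf
      have := ih i hi' hf'
      simp only [List.set, List.count_cons]
      omega

-- ---------- inner-loop specifications ----------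
structure StepOut (A : List Int) (fibs : List Int) (p jv : Int)
    (q : List (Int × Int)) (v : List Bool) (q' : List (Int × Int)) (v' : List Bool) : Prop where
  len : v'.length = v.length
  mono : ∀ i : Nat, v.getD i false = true → v'.getD i false = true
  news : ∃ ns : List (Int × Int), q' = q ++ ns ∧
    (∀ e ∈ ns, e.2 = jv + 1 ∧ 0 ≤ e.1 ∧ e.1 < (A.length : Int) ∧ A.getD e.1.toNat 0 = 1 ∧
      v.getD e.1.toNat false = false ∧ (∃ jf ∈ fibs, e.1 = p + jf)) ∧
    (ns.map Prod.fst).Nodup ∧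
    (∀ i : Nat, v'.getD i false = true → v.getD i false = true ∨ ∃ e ∈ ns, e.1.toNat = i)
  complete : ∀ jf ∈ fibs, 0 ≤ p + jf → p + jf < (A.length : Int) → A.getD (p + jf).toNat 0 = 1 →
    v'.getD (p + jf).toNat false = true
  meas : 2 * v'.count false + q'.length ≤ 2 * v.count false + q.length

theorem procLoop_inl (A : List Int) (p jv : Int) :
    ∀ (fibs : List Int) (q : List (Int × Int)) (v : List Bool),
    (∃ jf ∈ fibs, p + jf = (A.length : Int)) → procLoop A fibs p jv q v = .inl (jv + 1) := by
  intro fibs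
  induction fibs with
  | nil => intro q v h; simp at h
  | cons j rest ih =>
    intro q v h
    rcases h with ⟨jf, hjf, he⟩
    rcases List.mem_cons.mp hjf with rfl | hjf
    · unfold procLoop
      rw [if_pos he]
    · unfold procLoop
      by_cases h1 : p + j = (A.length : Int)
      · rw [if_pos h1]
      · rw [if_neg h1]
        split
        · exact ih _ _ ⟨jf, hjf, he⟩
        · exact ih _ _ ⟨jf, hjf, he⟩

theorem procLoop_spec (A : List Int) (p jv : Int) :
    ∀ (fibs : List Int) (q : List (Int × Int)) (v : List Bool),
    (∀ jf ∈ fibs, p + jf ≠ (A.length : Int)) → v.length = A.length + 1 →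
    ∃ q' v', procLoop A fibs p jv q v = .inr (q', v') ∧ StepOut A fibs p jv q v q' v' := by
  intro fibs
  induction fibs with
  | nil =>
    intro q v _ _
    refine ⟨q, v, rfl, ?_⟩
    exact { len := rfl
            mono := fun i h => h
            news := ⟨[], by simp, by simp, by simp, fun i h => Or.inl h⟩
            complete := by simp
            meas := le_refl _ }
  | cons j rest ih =>
    intro q v hno hv
    have hjne : p + j ≠ (A.length : Int) := hno j (List.mem_cons_self ..)
    have hrestno : ∀ jf ∈ rest, p + jf ≠ (A.length : Int) :=
      fun jf h => hno jf (List.mem_cons_of_mem _ h)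
    unfold procLoop
    rw [if_neg hjne]
    by_cases hg : 0 ≤ p + j ∧ p + j < (A.length : Int) ∧ A.getD (p + j).toNat 0 = 1 ∧
        v.getD (p + j).toNat false = false
    · rw [if_pos hg]
      obtain ⟨h0, h1, hok, hnv⟩ := hg
      have hlt : (p + j).toNat < v.length := by omega
      obtain ⟨q', v', hrun, so⟩ := ih (q ++ [(p + j, jv + 1)]) (v.set (p + j).toNat true)
        hrestno (by simp [hv])
      refine ⟨q', v', hrun, ?_⟩
      obtain ⟨ns', hq', hns', hnd', hnew'⟩ := so.news
      have hsetT : (v.set (p + j).toNat true).getD (p + j).toNat false = true :=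
        getD_set_self v _ hlt
      refine { len := by rw [so.len]; simp
               mono := fun i h => so.mono i (getD_set_mono v _ i h)
               news := ⟨(p + j, jv + 1) :: ns', by rw [hq']; simp, ?_, ?_, ?_⟩
               complete := ?_
               meas := ?_ }
      · intro e he
        rcases List.mem_cons.mp he with rfl | he
        · exact ⟨rfl, h0, h1, hok, hnv, ⟨j, List.mem_cons_self .., rfl⟩⟩
        · obtain ⟨he2, he0, he1, heok, henv, jf, hjf, hje⟩ := hns' e he
          refine ⟨he2, he0, he1, heok, ?_, ⟨jf, List.mem_cons_of_mem _ hjf, hje⟩⟩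
          by_cases hi : (p + j).toNat = e.1.toNat
          · rw [← hi, hsetT] at henv; cases henv
          · rw [getD_set_other v _ _ hi] at henv; exact henv
      · refine List.nodup_cons.mpr ⟨?_, hnd'⟩
        intro hc
        rcases List.mem_map.mp hc with ⟨e, he, hfe⟩
        obtain ⟨_, he0, _, _, henv, _⟩ := hns' e he
        have : (p + j).toNat = e.1.toNat := by omega
        rw [← this, hsetT] at henv; cases henv
      · intro i h
        rcases hnew' i h with h | ⟨e, he, hie⟩
        · rcases getD_set_rev v _ i h with h | rfl
          · exact Or.inl h
          · exact Or.inr ⟨(p + j, jv + 1), List.mem_cons_self .., rfl⟩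
        · exact Or.inr ⟨e, List.mem_cons_of_mem _ he, hie⟩
      · intro jf hm h0' h1' hok'
        rcases List.mem_cons.mp hm with rfl | hm
        · exact so.mono _ hsetT
        · exact so.complete jf hm h0' h1' hok'
      · have hcnt := count_false_set_true v (p + j).toNat hlt hnv
        have := so.meas
        simp only [List.length_append, List.length_cons, List.length_nil] at this ⊢
        omega
    · rw [if_neg hg]
      obtain ⟨q', v', hrun, so⟩ := ih q v hrestno hv
      refine ⟨q', v', hrun, ?_⟩
      obtain ⟨ns', hq', hns', hnd', hnew'⟩ := so.news
      refine { len := so.len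
               mono := so.mono
               news := ⟨ns', hq', ?_, hnd', hnew'⟩
               complete := ?_
               meas := so.meas }
      · intro e he
        obtain ⟨he2, he0, he1, heok, henv, jf, hjf, hje⟩ := hns' e he
        exact ⟨he2, he0, he1, heok, henv, ⟨jf, List.mem_cons_of_mem _ hjf, hje⟩⟩
      · intro jf hm h0' h1' hok'
        rcases List.mem_cons.mp hm with rfl | hm
        · have hvt : v.getD (p + jf).toNat false = true := by
            by_contra hc
            exact hg ⟨h0', h1', hok', by simpa using hc⟩
          exact so.mono _ hvt
        · exact so.complete jf hm h0' h1' hok'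

structure SeedOut (A : List Int) (fibs : List Int)
    (q : List (Int × Int)) (v : List Bool) (q' : List (Int × Int)) (v' : List Bool) : Prop where
  len : v'.length = v.length
  mono : ∀ i : Nat, v.getD i false = true → v'.getD i false = true
  news : ∃ ns : List (Int × Int), q' = q ++ ns ∧
    (∀ e ∈ ns, e.2 = 1 ∧ 0 ≤ e.1 ∧ e.1 < (A.length : Int) ∧ A.getD e.1.toNat 0 = 1 ∧
      (∃ jf ∈ fibs, e.1 = jf - 1)) ∧
    (ns.map Prod.fst).Nodup ∧
    (∀ i : Nat, v'.getD i false = true → v.getD i false = true ∨ ∃ e ∈ ns, e.1.toNat = i)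
  complete : ∀ jf ∈ fibs, 0 ≤ jf - 1 → jf - 1 < (A.length : Int) → A.getD (jf - 1).toNat 0 = 1 →
    v'.getD (jf - 1).toNat false = true

theorem seedLoop_inl (A : List Int) :
    ∀ (fibs : List Int) (q : List (Int × Int)) (v : List Bool),
    (∃ jf ∈ fibs, jf - 1 = (A.length : Int)) → seedLoop A fibs q v = .inl 1 := by
  intro fibs
  induction fibs with
  | nil => intro q v h; simp at h
  | cons j rest ih =>
    intro q v h
    rcases h with ⟨jf, hjf, he⟩
    rcases List.mem_cons.mp hjf with rfl | hjf
    · unfold seedLoop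
      rw [if_pos he]
    · unfold seedLoop
      by_cases h1 : j - 1 = (A.length : Int)
      · rw [if_pos h1]
      · rw [if_neg h1]
        split
        · exact ih _ _ ⟨jf, hjf, he⟩
        · exact ih _ _ ⟨jf, hjf, he⟩

theorem seedLoop_spec (A : List Int) :
    ∀ (fibs : List Int) (q : List (Int × Int)) (v : List Bool), fibs.Nodup →
    (∀ jf ∈ fibs, jf - 1 ≠ (A.length : Int)) → v.length = A.length + 1 →
    ∃ q' v', seedLoop A fibs q v = .inr (q', v') ∧ SeedOut A fibs q v q' v' := by
  intro fibs
  induction fibs with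
  | nil =>
    intro q v _ _ _
    refine ⟨q, v, rfl, ?_⟩
    exact { len := rfl
            mono := fun i h => h
            news := ⟨[], by simp, by simp, by simp, fun i h => Or.inl h⟩
            complete := by simp }
  | cons j rest ih =>
    intro q v hnd hno hv
    have hjne : j - 1 ≠ (A.length : Int) := hno j (List.mem_cons_self ..)
    have hrestno : ∀ jf ∈ rest, jf - 1 ≠ (A.length : Int) :=
      fun jf h => hno jf (List.mem_cons_of_mem _ h)
    have hndr : rest.Nodup := (List.nodup_cons.mp hnd).2
    have hjnr : j ∉ rest := (List.nodup_cons.mp hnd).1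
    unfold seedLoop
    rw [if_neg hjne]
    by_cases hg : 0 ≤ j - 1 ∧ j - 1 < (A.length : Int) ∧ A.getD (j - 1).toNat 0 = 1
    · rw [if_pos hg]
      obtain ⟨h0, h1, hok⟩ := hg
      have hlt : (j - 1).toNat < v.length := by omega
      obtain ⟨q', v', hrun, so⟩ := ih (q ++ [(j - 1, 1)]) (v.set (j - 1).toNat true)
        hndr hrestno (by simp [hv])
      refine ⟨q', v', hrun, ?_⟩
      obtain ⟨ns', hq', hns', hnd', hnew'⟩ := so.news
      have hsetT : (v.set (j - 1).toNat true).getD (j - 1).toNat false = true :=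
        getD_set_self v _ hlt
      refine { len := by rw [so.len]; simp
               mono := fun i h => so.mono i (getD_set_mono v _ i h)
               news := ⟨(j - 1, 1) :: ns', by rw [hq']; simp, ?_, ?_, ?_⟩
               complete := ?_ }
      · intro e he
        rcases List.mem_cons.mp he with rfl | he
        · exact ⟨rfl, h0, h1, hok, ⟨j, List.mem_cons_self .., rfl⟩⟩
        · obtain ⟨he2, he0, he1, heok, jf, hjf, hje⟩ := hns' e he
          exact ⟨he2, he0, he1, heok, ⟨jf, List.mem_cons_of_mem _ hjf, hje⟩⟩
      · refine List.nodup_cons.mpr ⟨?_, hnd'⟩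
        intro hc
        rcases List.mem_map.mp hc with ⟨e, he, hfe⟩
        obtain ⟨_, _, _, _, jf, hjf, hje⟩ := hns' e he
        have : jf = j := by omega
        rw [this] at hjf
        exact hjnr hjf
      · intro i h
        rcases hnew' i h with h | ⟨e, he, hie⟩
        · rcases getD_set_rev v _ i h with h | rfl
          · exact Or.inl h
          · exact Or.inr ⟨(j - 1, 1), List.mem_cons_self .., rfl⟩
        · exact Or.inr ⟨e, List.mem_cons_of_mem _ he, hie⟩
      · intro jf hm h0' h1' hok'
        rcases List.mem_cons.mp hm with rfl | hm
        · exact so.mono _ hsetT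
        · exact so.complete jf hm h0' h1' hok'
    · rw [if_neg hg]
      obtain ⟨q', v', hrun, so⟩ := ih q v hndr hrestno hv
      refine ⟨q', v', hrun, ?_⟩
      obtain ⟨ns', hq', hns', hnd', hnew'⟩ := so.news
      refine { len := so.len
               mono := so.mono
               news := ⟨ns', hq', ?_, hnd', hnew'⟩
               complete := ?_ }
      · intro e he
        obtain ⟨he2, he0, he1, heok, jf, hjf, hje⟩ := hns' e he
        exact ⟨he2, he0, he1, heok, ⟨jf, List.mem_cons_of_mem _ hjf, hje⟩⟩
      · intro jf hm h0' h1' hok'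
        rcases List.mem_cons.mp hm with rfl | hm
        · exact absurd ⟨h0', h1', hok'⟩ hg
        · exact so.complete jf hm h0' h1' hok'

-- ---------- the BFS invariant ----------
structure BfsInv (A : List Int) (queue : List (Int × Int)) (v : List Bool) : Prop where
  entries : ∀ e ∈ queue, 0 ≤ e.1 ∧ e.1 < (A.length : Int) ∧ A.getD e.1.toNat 0 = 1 ∧
    v.getD e.1.toNat false = true ∧ e.2 = pvD A e.1 ∧ pvD A e.1 < (A.length : Int) + 2
  sorted : (queue.map Prod.snd).Pairwise (· ≤ ·)
  bnd : ∀ e1 ∈ queue, ∀ e2 ∈ queue, e2.2 ≤ e1.2 + 1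
  nodup : (queue.map Prod.fst).Nodup
  procd : ∀ p : Int, 0 ≤ p → p < (A.length : Int) → v.getD p.toNat false = true →
    p ∉ queue.map Prod.fst →
    (∀ jf ∈ pvFib A.length, p + jf ≠ (A.length : Int)) ∧
    (∀ jf ∈ pvFib A.length, 0 ≤ p + jf → p + jf < (A.length : Int) →
      A.getD (p + jf).toNat 0 = 1 → v.getD (p + jf).toNat false = true)
  start : ∀ jf ∈ pvFib A.length, jf - 1 ≠ (A.length : Int) ∧
    (0 ≤ jf - 1 → jf - 1 < (A.length : Int) → A.getD (jf - 1).toNat 0 = 1 →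
      v.getD (jf - 1).toNat false = true)

theorem pairwise_le_const (c : Int) : ∀ (l : List Int), (∀ x ∈ l, x = c) → l.Pairwise (· ≤ ·) := by
  intro l
  induction l with
  | nil => intro _; exact List.Pairwise.nil
  | cons x t ih =>
    intro h
    refine List.pairwise_cons.mpr ⟨?_, ih fun y hy => h y (List.mem_cons_of_mem _ hy)⟩
    intro y hy
    rw [h x (List.mem_cons_self ..), h y (List.mem_cons_of_mem _ hy)]

-- every ok position whose distance is at most c (a lower bound for the queue) is visited
theorem inv_reached (A : List Int) (queue : List (Int × Int)) (v : List Bool)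
    (inv : BfsInv A queue v) (c : Int) (hq : ∀ e ∈ queue, c ≤ e.2) :
    ∀ (n : Nat) (s : Int), (pvD A s).toNat = n → 0 ≤ s → s < (A.length : Int) →
    A.getD s.toNat 0 = 1 → pvD A s < (A.length : Int) + 2 → pvD A s ≤ c →
    v.getD s.toNat false = true := by
  intro n
  induction n using Nat.strong_induction_on with
  | _ n ih =>
    intro s hn h0 h1 hok hfin hc
    have hg : pvGood A s := Or.inr ⟨h0, h1, hok⟩
    rcases pvD_P1 A s hg hfin with ⟨hm, hv1⟩ | ⟨j, hj, hq0, hqN, hqok, hqfin, hval⟩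
    · have hst := (inv.start (s + 1) hm).2
      have he : (s + 1) - 1 = s := by ring
      rw [he] at hst
      exact hst h0 h1 hok
    · have hd1 := pvD_ge_one A (s - j)
      have hlt : (pvD A (s - j)).toNat < n := by omega
      have hvq := ih _ hlt (s - j) rfl hq0 hqN hqok hqfin (by omega)
      have hnq : (s - j) ∉ queue.map Prod.fst := by
        intro hc'
        rcases List.mem_map.mp hc' with ⟨e, he, hfe⟩
        have h5 := (inv.entries e he).2.2.2.2.1
        have h6 := hq e he
        rw [hfe] at h5
        omega
      have hpd := (inv.procd (s - j) hq0 hqN hvq hnq).2 j hj (by omega) (by omega)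
      have he2 : (s - j) + j = s := by ring
      rw [he2] at hpd
      exact hpd hok

-- while the invariant holds (and no return has fired) the goal's distance exceeds the frontier
theorem inv_goal_ge (A : List Int) (queue : List (Int × Int)) (v : List Bool)
    (inv : BfsInv A queue v) (c : Int) (hq : ∀ e ∈ queue, c ≤ e.2)
    (hfin : pvD A (A.length : Int) < (A.length : Int) + 2)
    (hDc : pvD A (A.length : Int) ≤ c) : False := by
  rcases pvD_P1 A ((A.length : Int)) (Or.inl rfl) hfin
    with ⟨hm, _⟩ | ⟨j, hj, hq0, hqN, hqok, hqfin, hval⟩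
  · have := (inv.start ((A.length : Int) + 1) hm).1
    omega
  · have hd1 := pvD_ge_one A ((A.length : Int) - j)
    have hvq := inv_reached A queue v inv c hq (pvD A ((A.length : Int) - j)).toNat
      ((A.length : Int) - j) rfl hq0 hqN hqok hqfin (by omega)
    have hnq : ((A.length : Int) - j) ∉ queue.map Prod.fst := by
      intro hc'
      rcases List.mem_map.mp hc' with ⟨e, he, hfe⟩
      have h5 := (inv.entries e he).2.2.2.2.1
      have h6 := hq e he
      rw [hfe] at h5
      omega
    have hpd := (inv.procd ((A.length : Int) - j) hq0 hqN hvq hnq).1 j hj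
    have he2 : ((A.length : Int) - j) + j = (A.length : Int) := by ring
    omega

-- ---------- the main BFS induction ----------
theorem bfs_main (A : List Int) : ∀ (fuel : Nat) (queue : List (Int × Int)) (v : List Bool),
    BfsInv A queue v → v.length = A.length + 1 →
    2 * v.count false + queue.length ≤ fuel →
    bfsLoop A (pvFib A.length) fuel queue v =
      (if pvD A (A.length : Int) < (A.length : Int) + 2 then pvD A (A.length : Int) else -1) := by
  intro fuel
  induction fuel with
  | zero =>
    intro queue v inv hv hf
    have hq0 : queue = [] := by
      cases queue with
      | nil => rfl
      | cons e t => simp [List.length_cons] at hf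
    subst hq0
    rw [bfsLoop]
    rw [if_neg]
    intro hfin
    exact inv_goal_ge A [] v inv (pvD A (A.length : Int)) (by simp) hfin (le_refl _)
  | succ f ihf =>
    intro queue v inv hv hf
    cases queue with
    | nil =>
      rw [bfsLoop]
      rw [if_neg]
      intro hfin
      exact inv_goal_ge A [] v inv (pvD A (A.length : Int)) (by simp) hfin (le_refl _)
    | cons hd rest =>
      obtain ⟨p, jlv⟩ := hd
      obtain ⟨h0, h1, hok, hvis, hval, hfinp⟩ := inv.entries (p, jlv) (List.mem_cons_self ..)
      dsimp only at h0 h1 hok hvis hval hfinp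
      have hplev : jlv ≤ (A.length : Int) := by
        have := pvD_fin_le A p.toNat p rfl h0 (by omega) hfinp
        omega
      have hqc : ∀ e ∈ (p, jlv) :: rest, jlv ≤ e.2 := by
        intro e he
        rcases List.mem_cons.mp he with rfl | he
        · exact le_refl _
        · have hs := inv.sorted
          rw [List.map_cons] at hs
          exact (List.pairwise_cons.mp hs).1 e.2 (List.mem_map_of_mem he)
      by_cases hre : ∃ jf ∈ pvFib A.length, p + jf = (A.length : Int)
      · rw [bfsLoop, procLoop_inl A p jlv _ rest v hre]
        have hle : pvD A (A.length : Int) ≤ jlv + 1 := by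
          obtain ⟨jf, hjf, hpe⟩ := hre
          have hq0' : 0 ≤ (A.length : Int) - jf := by omega
          have := pvD_le_pred A (A.length : Int) jf (Or.inl rfl) hjf hq0'
          have he : (A.length : Int) - jf = p := by omega
          rw [he] at this
          omega
        have hge : ¬ pvD A (A.length : Int) ≤ jlv := by
          intro hcon
          exact inv_goal_ge A _ v inv jlv hqc (by omega) hcon
        have hDN : pvD A (A.length : Int) = jlv + 1 := by omega
        rw [hDN, if_pos (by omega)]
      · push_neg at hre
        obtain ⟨q', v', hrun, so⟩ := procLoop_spec A p jlv (pvFib A.length) rest v hre hv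
        rw [bfsLoop, hrun]
        obtain ⟨ns, hq', hns, hnsnd, hnew⟩ := so.news
        -- distances of the newly discovered nodes are exactly jlv + 1
        have hnsD : ∀ e ∈ ns, pvD A e.1 = jlv + 1 := by
          intro e he
          obtain ⟨he2, he0, he1, heok, henv, jf, hjf, hje⟩ := hns e he
          have hgood : pvGood A e.1 := Or.inr ⟨he0, he1, heok⟩
          have hle : pvD A e.1 ≤ jlv + 1 := by
            have hq0' : 0 ≤ e.1 - jf := by omega
            have := pvD_le_pred A e.1 jf hgood hjf hq0'
            have hee : e.1 - jf = p := by omega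
            rw [hee] at this
            omega
          have hge : ¬ pvD A e.1 ≤ jlv := by
            intro hcon
            have := inv_reached A _ v inv jlv hqc (pvD A e.1).toNat e.1 rfl he0 he1 heok
              (by omega) hcon
            rw [this] at henv
            cases henv
          omega
        have hnsvis : ∀ e ∈ ns, v'.getD e.1.toNat false = true := by
          intro e he
          obtain ⟨he2, he0, he1, heok, henv, jf, hjf, hje⟩ := hns e he
          have := so.complete jf hjf (by omega) (by omega) (by rw [← hje]; exact heok)
          rw [← hje] at this
          exact this
        refine ihf q' v' ?_ (by rw [so.len]; exact hv) ?_
        · -- re-establish the invariant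
          subst hq'
          refine { entries := ?_, sorted := ?_, bnd := ?_, nodup := ?_, procd := ?_, start := ?_ }
          · intro e he
            rcases List.mem_append.mp he with he | he
            · obtain ⟨a1, a2, a3, a4, a5, a6⟩ := inv.entries e (List.mem_cons_of_mem _ he)
              exact ⟨a1, a2, a3, so.mono _ a4, a5, a6⟩
            · obtain ⟨he2, he0, he1, heok, henv, _, hjf, hje⟩ := hns e he
              exact ⟨he0, he1, heok, hnsvis e he, by rw [he2, hnsD e he], by rw [hnsD e he]; omega⟩
          · rw [List.map_append]
            refine List.pairwise_append.mpr ⟨?_, ?_, ?_⟩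
            · have hs := inv.sorted
              rw [List.map_cons] at hs
              exact (List.pairwise_cons.mp hs).2
            · exact pairwise_le_const (jlv + 1) _ (by
                intro x hx
                rcases List.mem_map.mp hx with ⟨e, he, hfe⟩
                rw [← hfe]
                exact (hns e he).1)
            · intro x hx y hy
              rcases List.mem_map.mp hx with ⟨e, he, hfe⟩
              rcases List.mem_map.mp hy with ⟨e', he', hfe'⟩
              have hb := inv.bnd (p, jlv) (List.mem_cons_self ..) e (List.mem_cons_of_mem _ he)
              have : y = jlv + 1 := by rw [← hfe']; exact (hns e' he').1
              omega
          · intro e1 he1 e2 he2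
            rcases List.mem_append.mp he1 with he1 | he1 <;>
              rcases List.mem_append.mp he2 with he2 | he2
            · exact inv.bnd e1 (List.mem_cons_of_mem _ he1) e2 (List.mem_cons_of_mem _ he2)
            · have : e2.2 = jlv + 1 := (hns e2 he2).1
              have := hqc e1 (List.mem_cons_of_mem _ he1)
              omega
            · have hb := inv.bnd (p, jlv) (List.mem_cons_self ..) e2 (List.mem_cons_of_mem _ he2)
              have : e1.2 = jlv + 1 := (hns e1 he1).1
              omega
            · have ha : e1.2 = jlv + 1 := (hns e1 he1).1
              have hb : e2.2 = jlv + 1 := (hns e2 he2).1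
              omega
          · rw [List.map_append]
            refine List.nodup_append.mpr ⟨?_, hnsnd, ?_⟩
            · have hn := inv.nodup
              rw [List.map_cons] at hn
              exact (List.nodup_cons.mp hn).2
            · have hdisj : ∀ x : Int, x ∈ List.map Prod.fst rest → x ∈ List.map Prod.fst ns → False := by
                intro x hx hx'
                rcases List.mem_map.mp hx with ⟨e, he, hfe⟩
                rcases List.mem_map.mp hx' with ⟨e', he', hfe'⟩
                obtain ⟨b1, b2, b3, b4, b5, b6⟩ := inv.entries e (List.mem_cons_of_mem _ he)
                obtain ⟨c2, c0, c1, cok, cnv, _⟩ := hns e' he'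
                have heq : e.1.toNat = e'.1.toNat := by omega
                rw [← heq, b4] at cnv
                cases cnv
              exact fun x hx y hy hxy => hdisj x hx (by rw [hxy]; exact hy)
          · intro p0 hp0 hp1 hp0vis hp0nq
            rcases hnew p0.toNat hp0vis with holdvis | ⟨e, hens, hetoNat⟩
            · by_cases hpp : p0 = p
              · subst hpp
                refine ⟨hre, ?_⟩
                intro jf hjf hj0 hj1 hjok
                exact so.complete jf hjf hj0 hj1 hjok
              · have hnotold : p0 ∉ ((p, jlv) :: rest).map Prod.fst := by
                  intro hc'
                  rw [List.map_cons] at hc'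
                  rcases List.mem_cons.mp hc' with h | h
                  · exact hpp h
                  · exact hp0nq (by rw [List.map_append]; exact List.mem_append_left _ h)
                obtain ⟨o1, o2⟩ := inv.procd p0 hp0 hp1 holdvis hnotold
                exact ⟨o1, fun jf hjf a b c => so.mono _ (o2 jf hjf a b c)⟩
            · exfalso
              obtain ⟨_, he0, _, _, _, _⟩ := hns e hens
              have : e.1 = p0 := by omega
              apply hp0nq
              rw [List.map_append]
              exact List.mem_append_right _ (by rw [← this]; exact List.mem_map_of_mem hens)
          · intro jf hjf
            obtain ⟨s1, s2⟩ := inv.start jf hjf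
            exact ⟨s1, fun a b c => so.mono _ (s2 a b c)⟩
        · have hm := so.meas
          simp only [List.length_cons] at hf
          omega

theorem replicate_getD_false (n i : Nat) : (List.replicate n false).getD i false = false := by
  rw [List.getD_eq_getElem?_getD, List.getElem?_replicate]
  split <;> rfl

theorem solution_eq (A : List Int) : solution A =
    (if pvD A (A.length : Int) < (A.length : Int) + 2 then pvD A (A.length : Int) else -1) := by
  unfold solution
  dsimp only
  by_cases hs : ∃ jf ∈ pvFib A.length, jf - 1 = (A.length : Int)
  · rw [seedLoop_inl A _ _ _ hs]
    have hm : (A.length : Int) + 1 ∈ pvFib A.length := by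
      obtain ⟨jf, hjf, he⟩ := hs
      have : jf = (A.length : Int) + 1 := by omega
      rwa [this] at hjf
    have h1 : pvD A (A.length : Int) = 1 :=
      le_antisymm (pvD_le_one A _ (Or.inl rfl) hm) (pvD_ge_one A _)
    rw [h1, if_pos (by omega)]
  · push_neg at hs
    obtain ⟨q0, v0, hrun, so⟩ := seedLoop_spec A (pvFib A.length) []
      (List.replicate (A.length + 1) false) (pvFib_nodup _) hs (by simp)
    rw [hrun]
    obtain ⟨ns, hq0, hns, hnsnd, hnew⟩ := so.news
    rw [List.nil_append] at hq0
    have hent : ∀ e ∈ q0, e.2 = 1 ∧ 0 ≤ e.1 ∧ e.1 < (A.length : Int) ∧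
        A.getD e.1.toNat 0 = 1 ∧ (∃ jf ∈ pvFib A.length, e.1 = jf - 1) := by
      intro e he
      rw [hq0] at he
      obtain ⟨a1, a2, a3, a4, jf, hjf, hje⟩ := hns e he
      exact ⟨a1, a2, a3, a4, jf, hjf, hje⟩
    have hentD : ∀ e ∈ q0, pvD A e.1 = 1 := by
      intro e he
      obtain ⟨a1, a2, a3, a4, jf, hjf, hje⟩ := hent e he
      have hm1 : e.1 + 1 ∈ pvFib A.length := by
        have : e.1 + 1 = jf := by omega
        rwa [this]
      exact le_antisymm (pvD_le_one A _ (Or.inr ⟨a2, a3, a4⟩) hm1) (pvD_ge_one A _)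
    have hentV : ∀ e ∈ q0, v0.getD e.1.toNat false = true := by
      intro e he
      obtain ⟨a1, a2, a3, a4, jf, hjf, hje⟩ := hent e he
      have := so.complete jf hjf (by omega) (by omega) (by rw [← hje]; exact a4)
      rwa [← hje] at this
    have inv : BfsInv A q0 v0 := by
      refine { entries := ?_, sorted := ?_, bnd := ?_, nodup := ?_, procd := ?_, start := ?_ }
      · intro e he
        obtain ⟨a1, a2, a3, a4, _⟩ := hent e he
        exact ⟨a2, a3, a4, hentV e he, by rw [a1, hentD e he], by rw [hentD e he]; omega⟩
      · exact pairwise_le_const 1 _ (by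
          intro x hx
          rcases List.mem_map.mp hx with ⟨e, he, hfe⟩
          rw [← hfe]
          exact (hent e he).1)
      · intro e1 he1 e2 he2
        have := (hent e1 he1).1
        have := (hent e2 he2).1
        omega
      · rw [hq0]; exact hnsnd
      · intro p0 hp0 hp1 hp0vis hp0nq
        exfalso
        rcases hnew p0.toNat hp0vis with hold | ⟨e, hens, hetoNat⟩
        · rw [replicate_getD_false] at hold; cases hold
        · obtain ⟨_, he0, _⟩ := hns e hens
          have : e.1 = p0 := by omega
          apply hp0nq
          rw [hq0]
          rw [← this]
          exact List.mem_map_of_mem hens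
      · intro jf hjf
        exact ⟨hs jf hjf, fun a b c => so.complete jf hjf a b c⟩
    have hlen : v0.length = A.length + 1 := by rw [so.len]; simp
    have hfuel : 2 * v0.count false + q0.length ≤ 2 * (A.length + 1) + q0.length := by
      have := List.count_le_length (l := v0) (a := false)
      omega
    exact bfs_main A (2 * (A.length + 1) + q0.length) q0 v0 inv hlen hfuel

theorem solution_alt_eq (A : List Int) : solution_alt A =
    (if pvD A (A.length : Int) < (A.length : Int) + 2 then pvD A (A.length : Int) else -1) := by
  unfold solution_alt
  dsimp only
  have hans : dpStep (pvDP A) ((A.length : Int) + 2) (pvFib A.length) ((A.length : Int)) =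
      pvD A (A.length : Int) := by
    unfold pvD
    rw [if_pos rfl]
  rw [hans]
  by_cases h : pvD A (A.length : Int) ≤ (A.length : Int) + 1
  · rw [if_pos h, if_pos (by omega)]
  · rw [if_neg h, if_neg (by omega)]

theorem solution_spec : Claim_equal_solution := by
  intro A _
  unfold Spec_solution
  rw [solution_eq, solution_alt_eq]
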